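-- pv_equiv track=rewrite | github.com/ChrisRSE/n8n-workflow-auditor-mcp | src/n8n_auditor/report.py | build_text_summary
-- ===== SOURCE A (Python) =====
-- from collections import Counter
--
-- _SEVERITY_ORDER = ["critical", "high", "medium", "low", "info"]
--
-- def build_text_summary(findings: list[dict], workflow_name: str = "n8n Workflow") -> str:
--     """Return a compact, consistently-formatted plain-text audit summary.
--
--     Designed to be embedded in every audit tool's return dict so Claude can
--     present it directly without interpreting raw JSON.
--     """
--     actionable = [f for f in findings if f.get("severity") != "info"]
--     notes = [f for f in findings if f.get("severity") == "info"]
--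
--     fired_rule_ids = {f.get("rule_id") for f in actionable}
--     passes = len(_ALL_RULES) - len(fired_rule_ids)
--
--     header = f"── Audit: {workflow_name} ──"
--     lines: list[str] = [header]
--
--     if actionable:
--         counts = Counter(f.get("severity") for f in actionable)
--         parts = [f"{n} {sev}" for sev in _SEVERITY_ORDER[:-1] if (n := counts.get(sev, 0))]
--         status = "✗ ISSUES FOUND  (" + " · ".join(parts) + ")"
--     else:
--         status = "✓ CLEAN"
--
--     notes_suffix = f" · {len(notes)} info note{'s' if len(notes) != 1 else ''}" if notes else ""
--     lines.append(f"Status  : {status}")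
--     lines.append(f"Rules   : {passes}/15 passed{notes_suffix}")
--
--     if actionable:
--         lines.append("")
--         lines.append("Findings:")
--         sev_label = {
--             "critical": "CRITICAL",
--             "high": "HIGH    ",
--             "medium": "MEDIUM  ",
--             "low": "LOW     ",
--         }
--         for f in sorted(actionable, key=lambda x: _SEVERITY_ORDER.index(x.get("severity", "info"))):
--             sev = f.get("severity", "info")
--             label = sev_label.get(sev, sev.upper().ljust(8))
--             rule_id = f.get("rule_id", "").ljust(10)
--             node = (f.get("node_name") or "(workflow)").ljust(18)[:18]
--             msg = f.get("message", "")
--             if len(msg) > 80: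
--                 msg = msg[:77] + "..."
--             lines.append(f"  [{label}]  {rule_id}  {node}  {msg}")
--     else:
--         lines.append("")
--         lines.append("No actionable findings.")
--
--     if notes:
--         lines.append("")
--         lines.append("Notes (informational only):")
--         for f in notes:
--             rule_id = f.get("rule_id", "")
--             node = f.get("node_name") or "(workflow)"
--             evidence = f.get("evidence", "")
--             cred_type = ""
--             if "Credential type:" in evidence:
--                 cred_type = (
--                     " (" + evidence.split("Credential type:")[-1].split("|")[0].strip() + ")"
--                 )
--             lines.append(f"  {rule_id}  {node}{cred_type}")
--
--     return "\n".join(lines)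
--
-- _ALL_RULES: list[tuple[str, str, str]] = [
--     # (rule_id, category, short title)
--     ("CRED001", "Credentials", "Hardcoded credential in node parameters"),
--     ("CRED002", "Credentials", "OAuth credential cannot be verified statically"),
--     ("CRED003", "Credentials", "Credential referenced but not configured"),
--     ("CRED004", "Credentials", "Over-permissive Google OAuth scope"),
--     ("WEBHOOK001", "Webhooks", "Inbound webhook without authentication"),
--     ("WEBHOOK002", "Webhooks", "Webhook connects directly to Code node"),
--     ("WEBHOOK003", "Webhooks", "Webhook node has no rate limiting"),
--     ("WEBHOOK004", "Webhooks", "Webhook response exposes internal data"),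
--     ("ERR001", "Error Handling", "Node has no error output routing"),
--     ("ERR002", "Error Handling", "Workflow has no Error Trigger node"),
--     ("ERR003", "Error Handling", "Error branch terminates at noOp"),
--     ("DEPR001", "Deprecations", "Node using deprecated typeVersion"),
--     ("DEPR002", "Deprecations", "Node type removed in current n8n version"),
--     ("REL001", "Reliability", "HTTP Request node without retry configuration"),
--     ("REL002", "Reliability", "Batch loop without a Stop and Error node"),
-- ]
-- ===== SOURCE B (Python) =====
-- _SEVERITY_ORDER = ["critical", "high", "medium", "low", "info"]
-- _RULE_COUNT = 15  # len(_ALL_RULES) in the original module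
--
--
-- def _pad(s, w):
--     return s + " " * (w - len(s))
--
--
-- def _finding_line(f):
--     sev = f.get("severity", "info")
--     rid = _pad(f.get("rule_id", ""), 10)
--     node = ((f.get("node_name") or "(workflow)") + " " * 18)[:18]
--     msg = f.get("message", "")
--     if len(msg) > 80:
--         msg = msg[:77] + "..."
--     return "  [" + _pad(sev.upper(), 8) + "]  " + rid + "  " + node + "  " + msg
--
--
-- def _note_line(f):
--     rid = f.get("rule_id", "")
--     node = f.get("node_name") or "(workflow)"
--     evidence = f.get("evidence", "")
--     cred = ""
--     if "Credential type:" in evidence: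
--         cred = " (" + evidence.split("Credential type:")[-1].split("|")[0].strip() + ")"
--     return "  " + rid + "  " + node + cred
--
--
-- def build_text_summary(findings, workflow_name="n8n Workflow"):
--     """Group-by-severity variant: five filter passes replace the stable sort,
--     labels come from str.upper + padding instead of a lookup table, and the
--     report is accumulated as one string instead of a joined line list."""
--     notes = [f for f in findings if f.get("severity") == "info"]
--     actionable = [f for f in findings if f.get("severity") != "info"]
--     groups = [[f for f in actionable if f.get("severity", "info") == sev] for sev in _SEVERITY_ORDER]
--     fired = {f.get("rule_id") for f in actionable}
--
--     if actionable:
--         parts = [f"{len(g)} {sev}" for sev, g in zip(_SEVERITY_ORDER[:-1], groups) if g]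
--         status = "✗ ISSUES FOUND  (" + " · ".join(parts) + ")"
--     else:
--         status = "✓ CLEAN"
--     n = len(notes)
--     suffix = "" if n == 0 else (" · 1 info note" if n == 1 else f" · {n} info notes")
--
--     out = f"── Audit: {workflow_name} ──"
--     out += f"\nStatus  : {status}"
--     out += f"\nRules   : {_RULE_COUNT - len(fired)}/15 passed{suffix}"
--     if actionable:
--         out += "\n\nFindings:"
--         for g in groups:
--             for f in g:
--                 out += "\n" + _finding_line(f)
--     else:
--         out += "\n\nNo actionable findings."
--     if notes:
--         out += "\n\nNotes (informational only):"
--         for f in notes: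
--             out += "\n" + _note_line(f)
--     return out
-- ===== Notes on version B (the rewrite author's own statement) =====
-- stated objective: alternative
-- what changed: Replaces A's filter/Counter/stable-sort/joined-line-list pipeline with a group-by: one filter pass per severity in severity order (no sort, no Counter), severity labels computed by upper-casing + padding instead of a lookup table, and the report accumulated as one growing string instead of a list of lines joined at the end.
import Mathlib
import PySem

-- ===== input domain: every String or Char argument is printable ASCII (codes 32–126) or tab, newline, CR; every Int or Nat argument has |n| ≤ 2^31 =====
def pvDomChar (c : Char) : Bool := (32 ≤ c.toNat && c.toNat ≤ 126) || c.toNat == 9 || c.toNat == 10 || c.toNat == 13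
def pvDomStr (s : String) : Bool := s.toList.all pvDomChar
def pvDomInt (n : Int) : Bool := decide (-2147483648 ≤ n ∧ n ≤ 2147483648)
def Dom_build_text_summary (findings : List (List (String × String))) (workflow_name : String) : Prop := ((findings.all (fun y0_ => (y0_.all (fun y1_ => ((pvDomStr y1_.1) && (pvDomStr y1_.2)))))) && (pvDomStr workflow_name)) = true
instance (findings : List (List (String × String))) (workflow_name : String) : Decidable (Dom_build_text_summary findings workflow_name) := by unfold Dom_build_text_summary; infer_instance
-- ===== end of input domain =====

-- B replaces A's Counter/stable-sort/line-list pipeline by five per-severity filter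
-- passes (group-by), severity labels computed by upper-case + padding instead of a
-- lookup table, and the report accumulated as one growing string instead of a
-- joined list of lines; the output text is identical.

-- shared primitives (both Pythons use the same built-ins: dict.get, `or`)
def pvOrder : List String := ["critical", "high", "medium", "low", "info"]

-- Python dict.get on a findings dict (first match in the association list)
def pvGet (f : List (String × String)) (k : String) : Option String :=
  (PySem.Dict.mk f).get? k

-- Python `x or d` for strings (d when x is None or "")
def pvOrElse (o : Option String) (d : String) : String :=
  match o with
  | none => d
  | some s => if s = "" then d else s

-- the per-note line; this code is verbatim identical in both Pythons (A inline, B's _note_line)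
def pvNoteLine (f : List (String × String)) : String :=
  let rule_id := (pvGet f "rule_id").getD ""
  let node := pvOrElse (pvGet f "node_name") "(workflow)"
  let evidence := (pvGet f "evidence").getD ""
  let cred :=
    if PySem.Str.isIn "Credential type:" evidence then
      " (" ++ PySem.Str.strip
        ((PySem.Str.split? (((PySem.Str.split? evidence "Credential type:").getD []).getLastD "") "|").getD [] |>.headD "") ++ ")"
    else ""
  "  " ++ rule_id ++ "  " ++ node ++ cred

-- ===== PORT A =====
-- s.ljust(w) with space fill; exact (hand port, PySem has no ljust)
def pvLjust (s : String) (w : Nat) : String :=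
  s ++ String.ofList (List.replicate (w - (PySem.Str.len s).toNat) ' ')

-- _SEVERITY_ORDER.index(f.get("severity", "info")) — total form via getD 0;
-- Pre_ guarantees the looked-up severity is present in pvOrder (else Python raises ValueError)
def pvKey (f : List (String × String)) : Nat :=
  (PySem.List.index? pvOrder ((pvGet f "severity").getD "info")).getD 0

-- the body of A's per-finding line (the loop body of the Findings loop, verbatim)
def pvLineA (f : List (String × String)) : String :=
  let sev := (pvGet f "severity").getD "info"
  let label := ((PySem.Dict.mk [("critical", "CRITICAL"), ("high", "HIGH    "),
      ("medium", "MEDIUM  "), ("low", "LOW     ")]).get? sev).getD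
      (pvLjust (PySem.Str.upper sev) 8)
  let rule_id := pvLjust ((pvGet f "rule_id").getD "") 10
  let node := PySem.Str.slice (pvLjust (pvOrElse (pvGet f "node_name") "(workflow)") 18) none (some 18)
  let msg := (pvGet f "message").getD ""
  let msg := if PySem.Str.len msg > 80 then PySem.Str.slice msg none (some 77) ++ "..." else msg
  "  [" ++ label ++ "]  " ++ rule_id ++ "  " ++ node ++ "  " ++ msg

def build_text_summary (findings : List (List (String × String))) (workflow_name : String) : String :=
  let actionable := findings.filter (fun f => !(pvGet f "severity" == some "info"))
  let notes := findings.filter (fun f => pvGet f "severity" == some "info")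
  let fired_rule_ids := PySem.Set.ofList (actionable.map (fun f => pvGet f "rule_id"))
  -- len(_ALL_RULES) = 15 (the module's fixed rule table)
  let passes : Int := 15 - (fired_rule_ids.length : Int)
  let lines : List String := ["── Audit: " ++ workflow_name ++ " ──"]
  let status : String :=
    if actionable ≠ [] then
      let counts := PySem.Dict.counter (actionable.map (fun f => pvGet f "severity"))
      let parts := (["critical", "high", "medium", "low"] : List String).filterMap
        (fun sev =>
          let n := counts.getD (some sev) 0
          if n ≠ 0 then some (PySem.Int.toStr n ++ " " ++ sev) else none)
      "✗ ISSUES FOUND  (" ++ PySem.Str.join " · " parts ++ ")"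
    else "✓ CLEAN"
  let notes_suffix : String :=
    if notes ≠ [] then
      " · " ++ PySem.Int.toStr (notes.length : Int) ++ " info note" ++
        (if notes.length ≠ 1 then "s" else "")
    else ""
  let lines := lines ++ ["Status  : " ++ status]
  let lines := lines ++ ["Rules   : " ++ PySem.Int.toStr passes ++ "/15 passed" ++ notes_suffix]
  let lines :=
    if actionable ≠ [] then
      lines ++ ["", "Findings:"] ++
        (PySem.List.sorted actionable (fun x => pvKey x)).map pvLineA
    else
      lines ++ ["", "No actionable findings."]
  let lines :=
    if notes ≠ [] then
      lines ++ ["", "Notes (informational only):"] ++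
        notes.map pvNoteLine
    else lines
  PySem.Str.join "\n" lines

-- ===== PORT B =====
-- " " * n
def pvSpaces (n : Nat) : String := String.ofList (List.replicate n ' ')

-- B's _pad(s, w) = s + " " * (w - len(s))
def pvPad (s : String) (w : Nat) : String := s ++ pvSpaces (w - s.toList.length)

-- B's _finding_line
def pvFindingLine (f : List (String × String)) : String :=
  let sev := (pvGet f "severity").getD "info"
  let rid := pvPad ((pvGet f "rule_id").getD "") 10
  let node := PySem.Str.slice ((pvOrElse (pvGet f "node_name") "(workflow)") ++ pvSpaces 18) none (some 18)
  let msg := (pvGet f "message").getD ""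
  let msg := if PySem.Str.len msg > 80 then PySem.Str.slice msg none (some 77) ++ "..." else msg
  "  [" ++ pvPad (PySem.Str.upper sev) 8 ++ "]  " ++ rid ++ "  " ++ node ++ "  " ++ msg


def build_text_summary_alt (findings : List (List (String × String))) (workflow_name : String) : String :=
  let notes := findings.filter (fun f => pvGet f "severity" == some "info")
  let actionable := findings.filter (fun f => !(pvGet f "severity" == some "info"))
  -- group-by: one filter pass per severity, in severity order
  let groups := pvOrder.map (fun sev => actionable.filter (fun f => (pvGet f "severity").getD "info" == sev))
  let fired := PySem.Set.ofList (actionable.map (fun f => pvGet f "rule_id"))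
  let status : String :=
    if actionable ≠ [] then
      let parts := ((PySem.List.slice pvOrder none (some (-1))).zip groups).filterMap
        (fun p => if p.2 ≠ [] then some (PySem.Int.toStr (p.2.length : Int) ++ " " ++ p.1) else none)
      "✗ ISSUES FOUND  (" ++ PySem.Str.join " · " parts ++ ")"
    else "✓ CLEAN"
  let n := notes.length
  let suffix : String :=
    if n == 0 then "" else if n == 1 then " · 1 info note"
    else " · " ++ PySem.Int.toStr (n : Int) ++ " info notes"
  let out := "── Audit: " ++ workflow_name ++ " ──"
  let out := out ++ ("\nStatus  : " ++ status)
  let out := out ++ ("\nRules   : " ++ PySem.Int.toStr (15 - (fired.length : Int)) ++ "/15 passed" ++ suffix)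
  let out :=
    if actionable ≠ [] then
      groups.foldl (fun o g => g.foldl (fun o f => o ++ "\n" ++ pvFindingLine f) o) (out ++ "\n\nFindings:")
    else out ++ "\n\nNo actionable findings."
  let out :=
    if notes ≠ [] then
      notes.foldl (fun o f => o ++ "\n" ++ pvNoteLine f) (out ++ "\n\nNotes (informational only):")
    else out
  out

-- ===== PRECONDITION & SPEC =====
-- Pre_ excludes exactly the inputs where Python A raises ValueError: a finding whose
-- "severity" entry is a string outside _SEVERITY_ORDER (list.index fails in the sort key).
-- first "severity" entry of a finding, as a char list (kernel-fast equality for decide)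
def pvSevOfC (f : List (String × String)) : Option (List Char) :=
  match f with
  | [] => none
  | (k, v) :: rest => if k.toList == "severity".toList then some v.toList else pvSevOfC rest

def Pre_build_text_summary (findings : List (List (String × String))) (workflow_name : String) : Prop :=
  ∀ f ∈ findings, ((pvSevOfC f).getD "info".toList) ∈ pvOrder.map String.toList
instance (findings : List (List (String × String))) (workflow_name : String) : Decidable (Pre_build_text_summary findings workflow_name) := by unfold Pre_build_text_summary; infer_instance

def pvWitness_build_text_summary : (List (List (String × String))) × String :=
  ([[("severity", "high"), ("rule_id", "WEBHOOK001"), ("node_name", "Webhook"), ("message", "no auth")],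
    [("severity", "info"), ("rule_id", "CRED002"), ("evidence", "Credential type: googleApi | x")]],
   "n8n Workflow")

def Spec_build_text_summary (findings : List (List (String × String))) (workflow_name : String) (out : String) : Prop := out = build_text_summary_alt findings workflow_name
instance (findings : List (List (String × String))) (workflow_name : String) (out : String) : Decidable (Spec_build_text_summary findings workflow_name out) := by unfold Spec_build_text_summary; infer_instance

-- ===== CLAIM (what is proved, stated in full; the proofs are below) =====
def Claim_equal_build_text_summary : Prop := ∀ (findings : List (List (String × String))) (workflow_name : String), Dom_build_text_summary findings workflow_name → Pre_build_text_summary findings workflow_name → Spec_build_text_summary findings workflow_name (build_text_summary findings workflow_name)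


-- ===== LEMMAS AND PROOFS =====

-- the per-finding predicates the proof talks about
def pvIsInfo (f : List (String × String)) : Bool := pvGet f "severity" == some "info"
def pvBucketP (i : Nat) (f : List (String × String)) : Bool := !(pvIsInfo f) && pvKey f == i

-- the char-list severity of Pre_ is the String one of the ports
lemma pv_sevC_eq (f : List (String × String)) :
    pvSevOfC f = (pvGet f "severity").map String.toList := by
  induction f with
  | nil => rfl
  | cons kv rest ih =>
    obtain ⟨k, v⟩ := kv
    simp only [pvSevOfC, pvGet, PySem.Dict.get?_mk_cons]
    by_cases hk : k = "severity"
    · simp [hk]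
    · have h1 : (k.toList == "severity".toList) = false := by
        rw [beq_eq_false_iff_ne]
        exact fun he => hk (String.toList_inj.mp he)
      have h2 : (k == "severity") = false := by simp [hk]
      simp only [h1, h2, Bool.false_eq_true, if_false]
      simpa [pvGet] using ih

lemma pv_mem_map_toList (x : String) :
    (x.toList ∈ pvOrder.map String.toList) ↔ x ∈ pvOrder :=
  List.mem_map_of_injective (fun _ _ h => String.toList_inj.mp h)

lemma pv_pre_bridge (f : List (String × String)) :
    (((pvSevOfC f).getD "info".toList) ∈ pvOrder.map String.toList) ↔
      (((pvGet f "severity").getD "info") ∈ pvOrder) := by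
  rw [pv_sevC_eq]
  cases pvGet f "severity" with
  | none => exact pv_mem_map_toList "info"
  | some v => exact pv_mem_map_toList v

lemma pvKey_le_four (f : List (String × String))
    (h : ((pvGet f "severity").getD "info") ∈ pvOrder) : pvKey f ≤ 4 := by
  unfold pvKey
  simp only [pvOrder, List.mem_cons, List.not_mem_nil, or_false] at h
  rcases h with h | h | h | h | h <;> rw [h] <;> decide

-- for a finding admitted by Pre_, "severity is <sev_i>" is exactly "it falls in bucket i"
lemma pv_sev_bucket (f : List (String × String))
    (h : ((pvGet f "severity").getD "info") ∈ pvOrder) :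
    ((pvGet f "severity" == some "critical") = pvBucketP 0 f) ∧
    ((pvGet f "severity" == some "high") = pvBucketP 1 f) ∧
    ((pvGet f "severity" == some "medium") = pvBucketP 2 f) ∧
    ((pvGet f "severity" == some "low") = pvBucketP 3 f) := by
  cases hget : pvGet f "severity" with
  | none =>
      simp only [pvBucketP, pvIsInfo, pvKey, hget]
      decide
  | some v =>
      rw [hget] at h
      simp only [Option.getD_some, pvOrder, List.mem_cons, List.not_mem_nil, or_false] at h
      simp only [pvBucketP, pvIsInfo, pvKey, hget]
      rcases h with h | h | h | h | h <;> subst h <;> decide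

-- B's group test "f.get('severity','info') == sev (and f is actionable)" is bucket i
lemma pv_sevD_bucket (f : List (String × String))
    (h : ((pvGet f "severity").getD "info") ∈ pvOrder) :
    ((((pvGet f "severity").getD "info" == "critical") && !(pvGet f "severity" == some "info")) = pvBucketP 0 f) ∧
    ((((pvGet f "severity").getD "info" == "high") && !(pvGet f "severity" == some "info")) = pvBucketP 1 f) ∧
    ((((pvGet f "severity").getD "info" == "medium") && !(pvGet f "severity" == some "info")) = pvBucketP 2 f) ∧
    ((((pvGet f "severity").getD "info" == "low") && !(pvGet f "severity" == some "info")) = pvBucketP 3 f) ∧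
    ((((pvGet f "severity").getD "info" == "info") && !(pvGet f "severity" == some "info")) = pvBucketP 4 f) := by
  cases hget : pvGet f "severity" with
  | none =>
      simp only [pvBucketP, pvIsInfo, pvKey, hget]
      decide
  | some v =>
      rw [hget] at h
      simp only [Option.getD_some, pvOrder, List.mem_cons, List.not_mem_nil, or_false] at h
      simp only [pvBucketP, pvIsInfo, pvKey, hget]
      rcases h with h | h | h | h | h <;> subst h <;> decide

-- one group-by pass of B, phrased over findings
lemma pv_group_eq (findings : List (List (String × String)))
    (hpre : ∀ f ∈ findings, ((pvGet f "severity").getD "info") ∈ pvOrder)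
    (sev : String) (i : Nat)
    (hiff : ∀ f, ((pvGet f "severity").getD "info") ∈ pvOrder →
      ((((pvGet f "severity").getD "info" == sev) && !(pvGet f "severity" == some "info")) = pvBucketP i f)) :
    (findings.filter (fun f => !(pvGet f "severity" == some "info"))).filter
        (fun f => (pvGet f "severity").getD "info" == sev) = findings.filter (pvBucketP i) := by
  rw [List.filter_filter]
  exact List.filter_congr (fun f hf => hiff f (hpre f hf))

-- insertion into a key-partitioned list lands right after its own block
lemma pv_insertBy_sandwich {α : Type} (key : α → Nat) (x : α) (A B : List α)
    (hA : ∀ a ∈ A, ¬ key x < key a) (hB : ∀ b ∈ B, key x < key b) :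
    PySem.List.insertBy (fun a b => decide (key a < key b)) x (A ++ B) = A ++ x :: B := by
  induction A with
  | nil =>
      cases B with
      | nil => simp [PySem.List.insertBy]
      | cons b bs => simp [PySem.List.insertBy, hB b (by simp)]
  | cons a A ih =>
      have ha : ¬ key x < key a := hA a (by simp)
      simp only [List.cons_append, PySem.List.insertBy, decide_eq_true_eq, if_neg ha]
      simp [ih (fun a' ha' => hA a' (by simp [ha']))]

-- A's stable sort by a 0..4-valued key is the concatenation of the key buckets
lemma pv_sorted_eq_buckets (xs : List (List (String × String)))
    (h : ∀ x ∈ xs, pvKey x ≤ 4) :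
    PySem.List.sorted xs (fun x => pvKey x) =
      xs.filter (fun x => pvKey x == 0) ++ xs.filter (fun x => pvKey x == 1) ++
      xs.filter (fun x => pvKey x == 2) ++ xs.filter (fun x => pvKey x == 3) ++
      xs.filter (fun x => pvKey x == 4) := by
  induction xs using List.reverseRecOn with
  | nil => rfl
  | append_singleton xs x ih =>
    have hx : pvKey x ≤ 4 := h x (by simp)
    have hxs : ∀ y ∈ xs, pvKey y ≤ 4 := fun y hy => h y (by simp [hy])
    have hstep : PySem.List.sorted (xs ++ [x]) (fun y => pvKey y) =
        PySem.List.insertBy (fun a b => decide (pvKey a < pvKey b)) x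
          (PySem.List.sorted xs (fun y => pvKey y)) := by
      rw [PySem.List.sorted_eq_foldl_insertBy, PySem.List.sorted_eq_foldl_insertBy,
        List.foldl_append, List.foldl_cons, List.foldl_nil]
    rw [hstep, ih hxs]
    have h5 : pvKey x = 0 ∨ pvKey x = 1 ∨ pvKey x = 2 ∨ pvKey x = 3 ∨ pvKey x = 4 := by omega
    rcases h5 with hk | hk | hk | hk | hk
    · have e : xs.filter (fun y => pvKey y == 0) ++ xs.filter (fun y => pvKey y == 1) ++ xs.filter (fun y => pvKey y == 2) ++ xs.filter (fun y => pvKey y == 3) ++ xs.filter (fun y => pvKey y == 4) = xs.filter (fun y => pvKey y == 0) ++ (xs.filter (fun y => pvKey y == 1) ++ (xs.filter (fun y => pvKey y == 2) ++ (xs.filter (fun y => pvKey y == 3) ++ xs.filter (fun y => pvKey y == 4)))) := by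
        simp [List.append_assoc]
      have hA : ∀ a ∈ xs.filter (fun y => pvKey y == 0), ¬ pvKey x < pvKey a := by
        intro a ha
        simp only [List.mem_append, List.mem_filter, beq_iff_eq] at ha
        have hka : pvKey a ≤ 0 := by
          omega
        omega
      have hB : ∀ b ∈ (xs.filter (fun y => pvKey y == 1) ++ (xs.filter (fun y => pvKey y == 2) ++ (xs.filter (fun y => pvKey y == 3) ++ xs.filter (fun y => pvKey y == 4)))), pvKey x < pvKey b := by
        intro b hb
        simp only [List.mem_append, List.mem_filter, beq_iff_eq] at hb
        have hkb : 1 ≤ pvKey b := by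
          rcases hb with hb | hb | hb | hb <;> omega
        omega
      rw [e, pv_insertBy_sandwich (fun y => pvKey y) x _ _ hA hB]
      simp [List.filter_append, hk, List.append_assoc]
    · have e : xs.filter (fun y => pvKey y == 0) ++ xs.filter (fun y => pvKey y == 1) ++ xs.filter (fun y => pvKey y == 2) ++ xs.filter (fun y => pvKey y == 3) ++ xs.filter (fun y => pvKey y == 4) = (xs.filter (fun y => pvKey y == 0) ++ xs.filter (fun y => pvKey y == 1)) ++ (xs.filter (fun y => pvKey y == 2) ++ (xs.filter (fun y => pvKey y == 3) ++ xs.filter (fun y => pvKey y == 4))) := by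
        simp [List.append_assoc]
      have hA : ∀ a ∈ (xs.filter (fun y => pvKey y == 0) ++ xs.filter (fun y => pvKey y == 1)), ¬ pvKey x < pvKey a := by
        intro a ha
        simp only [List.mem_append, List.mem_filter, beq_iff_eq] at ha
        have hka : pvKey a ≤ 1 := by
          rcases ha with ha | ha <;> omega
        omega
      have hB : ∀ b ∈ (xs.filter (fun y => pvKey y == 2) ++ (xs.filter (fun y => pvKey y == 3) ++ xs.filter (fun y => pvKey y == 4))), pvKey x < pvKey b := by
        intro b hb
        simp only [List.mem_append, List.mem_filter, beq_iff_eq] at hb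
        have hkb : 2 ≤ pvKey b := by
          rcases hb with hb | hb | hb <;> omega
        omega
      rw [e, pv_insertBy_sandwich (fun y => pvKey y) x _ _ hA hB]
      simp [List.filter_append, hk, List.append_assoc]
    · have e : xs.filter (fun y => pvKey y == 0) ++ xs.filter (fun y => pvKey y == 1) ++ xs.filter (fun y => pvKey y == 2) ++ xs.filter (fun y => pvKey y == 3) ++ xs.filter (fun y => pvKey y == 4) = (xs.filter (fun y => pvKey y == 0) ++ (xs.filter (fun y => pvKey y == 1) ++ xs.filter (fun y => pvKey y == 2))) ++ (xs.filter (fun y => pvKey y == 3) ++ xs.filter (fun y => pvKey y == 4)) := by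
        simp [List.append_assoc]
      have hA : ∀ a ∈ (xs.filter (fun y => pvKey y == 0) ++ (xs.filter (fun y => pvKey y == 1) ++ xs.filter (fun y => pvKey y == 2))), ¬ pvKey x < pvKey a := by
        intro a ha
        simp only [List.mem_append, List.mem_filter, beq_iff_eq] at ha
        have hka : pvKey a ≤ 2 := by
          rcases ha with ha | ha | ha <;> omega
        omega
      have hB : ∀ b ∈ (xs.filter (fun y => pvKey y == 3) ++ xs.filter (fun y => pvKey y == 4)), pvKey x < pvKey b := by
        intro b hb
        simp only [List.mem_append, List.mem_filter, beq_iff_eq] at hb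
        have hkb : 3 ≤ pvKey b := by
          rcases hb with hb | hb <;> omega
        omega
      rw [e, pv_insertBy_sandwich (fun y => pvKey y) x _ _ hA hB]
      simp [List.filter_append, hk, List.append_assoc]
    · have e : xs.filter (fun y => pvKey y == 0) ++ xs.filter (fun y => pvKey y == 1) ++ xs.filter (fun y => pvKey y == 2) ++ xs.filter (fun y => pvKey y == 3) ++ xs.filter (fun y => pvKey y == 4) = (xs.filter (fun y => pvKey y == 0) ++ (xs.filter (fun y => pvKey y == 1) ++ (xs.filter (fun y => pvKey y == 2) ++ xs.filter (fun y => pvKey y == 3)))) ++ xs.filter (fun y => pvKey y == 4) := by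
        simp [List.append_assoc]
      have hA : ∀ a ∈ (xs.filter (fun y => pvKey y == 0) ++ (xs.filter (fun y => pvKey y == 1) ++ (xs.filter (fun y => pvKey y == 2) ++ xs.filter (fun y => pvKey y == 3)))), ¬ pvKey x < pvKey a := by
        intro a ha
        simp only [List.mem_append, List.mem_filter, beq_iff_eq] at ha
        have hka : pvKey a ≤ 3 := by
          rcases ha with ha | ha | ha | ha <;> omega
        omega
      have hB : ∀ b ∈ xs.filter (fun y => pvKey y == 4), pvKey x < pvKey b := by
        intro b hb
        simp only [List.mem_append, List.mem_filter, beq_iff_eq] at hb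
        have hkb : 4 ≤ pvKey b := by
          omega
        omega
      rw [e, pv_insertBy_sandwich (fun y => pvKey y) x _ _ hA hB]
      simp [List.filter_append, hk, List.append_assoc]
    · have e : xs.filter (fun y => pvKey y == 0) ++ xs.filter (fun y => pvKey y == 1) ++ xs.filter (fun y => pvKey y == 2) ++ xs.filter (fun y => pvKey y == 3) ++ xs.filter (fun y => pvKey y == 4) = (xs.filter (fun y => pvKey y == 0) ++ (xs.filter (fun y => pvKey y == 1) ++ (xs.filter (fun y => pvKey y == 2) ++ (xs.filter (fun y => pvKey y == 3) ++ xs.filter (fun y => pvKey y == 4))))) ++ ([] : List (List (String × String))) := by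
        simp [List.append_assoc]
      have hA : ∀ a ∈ (xs.filter (fun y => pvKey y == 0) ++ (xs.filter (fun y => pvKey y == 1) ++ (xs.filter (fun y => pvKey y == 2) ++ (xs.filter (fun y => pvKey y == 3) ++ xs.filter (fun y => pvKey y == 4))))), ¬ pvKey x < pvKey a := by
        intro a ha
        simp only [List.mem_append, List.mem_filter, beq_iff_eq] at ha
        have hka : pvKey a ≤ 4 := by
          rcases ha with ha | ha | ha | ha | ha <;> omega
        omega
      have hB : ∀ b ∈ ([] : List (List (String × String))), pvKey x < pvKey b := by
        intro b hb
        simp at hb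
      rw [e, pv_insertBy_sandwich (fun y => pvKey y) x _ _ hA hB]
      simp [List.filter_append, hk, List.append_assoc]

-- bucket i of the actionable list, phrased over findings
lemma pv_bucket_filter (findings : List (List (String × String))) (i : Nat) :
    (findings.filter (fun f => !(pvGet f "severity" == some "info"))).filter (fun x => pvKey x == i) =
      findings.filter (pvBucketP i) := by
  rw [List.filter_filter]
  exact List.filter_congr (fun f _ => by simp [pvBucketP, pvIsInfo, Bool.and_comm])

-- the Counter lookup for a non-info severity is the length of its bucket
lemma pv_count_bucket (findings : List (List (String × String)))
    (hpre : ∀ f ∈ findings, ((pvGet f "severity").getD "info") ∈ pvOrder)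
    (i : Nat) (sev : String)
    (hiff : ∀ f, ((pvGet f "severity").getD "info") ∈ pvOrder →
      (pvGet f "severity" == some sev) = pvBucketP i f) :
    (PySem.Dict.counter ((findings.filter (fun f => !(pvGet f "severity" == some "info"))).map
        (fun f => pvGet f "severity"))).getD (some sev) 0 =
      ((findings.filter (pvBucketP i)).length : Int) := by
  rw [PySem.Dict.getD_counter]
  congr 1
  rw [List.count_eq_countP, List.countP_map, List.countP_eq_length_filter]
  congr 1
  rw [List.filter_filter]
  refine List.filter_congr (fun f hfmem => ?_)
  have e := hiff f (hpre f hfmem)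
  simp only [Function.comp_apply, e, pvBucketP, pvIsInfo]
  cases hX : (pvGet f "severity" == some "info") <;> simp [hX]

-- the two "parts" comprehensions agree
lemma pv_parts_eq (findings : List (List (String × String)))
    (hpre : ∀ f ∈ findings, ((pvGet f "severity").getD "info") ∈ pvOrder) :
    (["critical", "high", "medium", "low"] : List String).filterMap
      (fun sev =>
        if (PySem.Dict.counter ((findings.filter (fun f => !(pvGet f "severity" == some "info"))).map
              (fun f => pvGet f "severity"))).getD (some sev) 0 ≠ 0 then
          some (PySem.Int.toStr ((PySem.Dict.counter ((findings.filter (fun f => !(pvGet f "severity" == some "info"))).map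
              (fun f => pvGet f "severity"))).getD (some sev) 0) ++ " " ++ sev)
        else none) =
    ((["critical", "high", "medium", "low"] : List String).zip
        [findings.filter (pvBucketP 0), findings.filter (pvBucketP 1), findings.filter (pvBucketP 2),
         findings.filter (pvBucketP 3), findings.filter (pvBucketP 4)]).filterMap
      (fun p => if p.2 ≠ [] then some (PySem.Int.toStr (p.2.length : Int) ++ " " ++ p.1) else none) := by
  have h0 := pv_count_bucket findings hpre 0 "critical" (fun f hf => (pv_sev_bucket f hf).1)
  have h1 := pv_count_bucket findings hpre 1 "high" (fun f hf => (pv_sev_bucket f hf).2.1)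
  have h2 := pv_count_bucket findings hpre 2 "medium" (fun f hf => (pv_sev_bucket f hf).2.2.1)
  have h3 := pv_count_bucket findings hpre 3 "low" (fun f hf => (pv_sev_bucket f hf).2.2.2)
  simp only [List.zip_cons_cons, List.zip_nil_left, List.filterMap_cons, List.filterMap_nil]
  rw [h0, h1, h2, h3]
  simp [List.length_eq_zero_iff]

-- ljust and B's pad agree
lemma pv_ljust_pad (s : String) (w : Nat) : pvLjust s w = pvPad s w := by
  simp [pvLjust, pvPad, pvSpaces, PySem.Str.len]

-- the two 18-wide node paddings agree after truncation
lemma pv_take_pad (l : List Char) :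
    (l ++ List.replicate (18 - l.length) ' ').take 18 = (l ++ List.replicate 18 ' ').take 18 := by
  rw [List.take_append, List.take_append, List.take_replicate, List.take_replicate]
  have h : min (18 - l.length) (18 - l.length) = min (18 - l.length) 18 := by omega
  rw [h]

lemma pv_node_eq (s : String) : PySem.Str.slice (pvLjust s 18) none (some 18)
    = PySem.Str.slice (s ++ pvSpaces 18) none (some 18) := by
  apply String.toList_inj.mp
  rw [PySem.Str.toList_slice, PySem.Str.toList_slice]
  simp only [PySem.Chars.slice_eq_listSlice]
  rw [PySem.List.slice_to _ (by norm_num), PySem.List.slice_to _ (by norm_num)]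
  simp only [pvLjust, pvSpaces, PySem.Str.len, String.toList_append, String.toList_ofList]
  have h18 : (Int.toNat 18) = 18 := rfl
  rw [h18]
  simpa using pv_take_pad s.toList

-- A's finding line equals B's for any severity in _SEVERITY_ORDER
lemma pv_line_eq (f : List (String × String))
    (h : ((pvGet f "severity").getD "info") ∈ pvOrder) :
    pvLineA f = pvFindingLine f := by
  have hlab : (((PySem.Dict.mk [("critical", "CRITICAL"), ("high", "HIGH    "),
      ("medium", "MEDIUM  "), ("low", "LOW     ")]).get? ((pvGet f "severity").getD "info")).getD
      (pvLjust (PySem.Str.upper ((pvGet f "severity").getD "info")) 8))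
      = pvPad (PySem.Str.upper ((pvGet f "severity").getD "info")) 8 := by
    simp only [pvOrder, List.mem_cons, List.not_mem_nil, or_false] at h
    rcases h with h | h | h | h | h <;> rw [h] <;> decide
  simp only [pvLineA, pvFindingLine]
  rw [hlab, pv_ljust_pad, pv_node_eq]

-- join over x :: xs is B's string accumulation
lemma pv_fold_shift (ys : List String) (a b : String) :
    a ++ ys.foldl (fun c l => c ++ "\n" ++ l) b = ys.foldl (fun c l => c ++ "\n" ++ l) (a ++ b) := by
  induction ys generalizing b with
  | nil => rfl
  | cons z zs ih =>
    rw [List.foldl_cons, List.foldl_cons, ih]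
    congr 1
    simp [String.append_assoc]

lemma pv_join_foldl (xs : List String) (x : String) :
    PySem.Str.join "\n" (x :: xs) = xs.foldl (fun a l => a ++ "\n" ++ l) x := by
  induction xs generalizing x with
  | nil => simp [PySem.Str.join, PySem.Chars.join_singleton]
  | cons y ys ih =>
    have h : PySem.Str.join "\n" (x :: y :: ys) = x ++ "\n" ++ PySem.Str.join "\n" (y :: ys) := by
      simp [PySem.Str.join, PySem.Chars.join_cons_cons]
      apply String.toList_inj.mp; simp
    rw [h, ih y]
    exact pv_fold_shift ys (x ++ "\n") y

-- A's notes suffix equals B's three-way suffix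
lemma pv_suffix_eq (notes : List (List (String × String))) :
    (if notes ≠ [] then
      " · " ++ PySem.Int.toStr (notes.length : Int) ++ " info note" ++
        (if notes.length ≠ 1 then "s" else "")
    else "")
    = (if notes.length == 0 then "" else if notes.length == 1 then " · 1 info note"
       else " · " ++ PySem.Int.toStr (notes.length : Int) ++ " info notes") := by
  rcases hn : notes with _ | ⟨a, l⟩
  · simp
  · have hne : a :: l ≠ [] := by simp
    rcases hl : l with _ | ⟨b, m⟩
    · simp
      decide
    · have h1 : (b :: m).length + 1 ≠ 0 := by omega
      have h2 : (b :: m).length + 1 ≠ 1 := by simp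
      simp [h1, h2]
      rw [String.append_assoc]
      congr 1

-- string re-associations between A's line list and B's accumulated string
lemma pv_w_status (b s : String) :
    b ++ ("\nStatus  : " ++ s) = b ++ "\n" ++ ("Status  : " ++ s) := by
  apply String.toList_inj.mp; simp

lemma pv_w_rules (b t suf : String) :
    b ++ ("\nRules   : " ++ t ++ "/15 passed" ++ suf) = b ++ "\n" ++ ("Rules   : " ++ t ++ "/15 passed" ++ suf) := by
  apply String.toList_inj.mp; simp

lemma pv_w_findings (b : String) :
    b ++ "\n\nFindings:" = b ++ "\n" ++ "" ++ "\n" ++ "Findings:" := by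
  apply String.toList_inj.mp; simp

lemma pv_w_noact (b : String) :
    b ++ "\n\nNo actionable findings." = b ++ "\n" ++ "" ++ "\n" ++ "No actionable findings." := by
  apply String.toList_inj.mp; simp

lemma pv_w_notes (b : String) :
    b ++ "\n\nNotes (informational only):" = b ++ "\n" ++ "" ++ "\n" ++ "Notes (informational only):" := by
  apply String.toList_inj.mp; simp

-- ===== VERDICT (by name: the statement is the Claim_ definition above) =====
theorem build_text_summary_spec : Claim_equal_build_text_summary := by
  unfold Claim_equal_build_text_summary
  intro findings wn _ hpre
  unfold Spec_build_text_summary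
  have hpre' : ∀ f ∈ findings, ((pvGet f "severity").getD "info") ∈ pvOrder :=
    fun f hf => (pv_pre_bridge f).mp (hpre f hf)
  have hact4 : ∀ f ∈ findings.filter (fun f => !(pvGet f "severity" == some "info")), pvKey f ≤ 4 :=
    fun f hf => pvKey_le_four f (hpre' f (List.mem_of_mem_filter hf))
  have hsorted : PySem.List.sorted (findings.filter (fun f => !(pvGet f "severity" == some "info"))) (fun x => pvKey x) =
      ([findings.filter (pvBucketP 0), findings.filter (pvBucketP 1), findings.filter (pvBucketP 2),
        findings.filter (pvBucketP 3), findings.filter (pvBucketP 4)] : List (List (List (String × String)))).flatten := by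
    rw [pv_sorted_eq_buckets _ hact4, pv_bucket_filter findings 0, pv_bucket_filter findings 1,
      pv_bucket_filter findings 2, pv_bucket_filter findings 3, pv_bucket_filter findings 4]
    simp [List.append_assoc]
  have hslice : PySem.List.slice pvOrder none (some (-1)) = ["critical", "high", "medium", "low"] := by decide
  have hgroups : pvOrder.map (fun sev => (findings.filter (fun f => !(pvGet f "severity" == some "info"))).filter
        (fun f => (pvGet f "severity").getD "info" == sev)) =
      [findings.filter (pvBucketP 0), findings.filter (pvBucketP 1), findings.filter (pvBucketP 2),
       findings.filter (pvBucketP 3), findings.filter (pvBucketP 4)] := by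
    simp only [pvOrder, List.map_cons, List.map_nil]
    rw [pv_group_eq findings hpre' "critical" 0 (fun f hf => (pv_sevD_bucket f hf).1),
      pv_group_eq findings hpre' "high" 1 (fun f hf => (pv_sevD_bucket f hf).2.1),
      pv_group_eq findings hpre' "medium" 2 (fun f hf => (pv_sevD_bucket f hf).2.2.1),
      pv_group_eq findings hpre' "low" 3 (fun f hf => (pv_sevD_bucket f hf).2.2.2.1),
      pv_group_eq findings hpre' "info" 4 (fun f hf => (pv_sevD_bucket f hf).2.2.2.2)]
  have hBfold : ∀ (init : String),
      ([findings.filter (pvBucketP 0), findings.filter (pvBucketP 1), findings.filter (pvBucketP 2),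
        findings.filter (pvBucketP 3), findings.filter (pvBucketP 4)] : List (List (List (String × String)))).foldl
        (fun o g => g.foldl (fun o f => o ++ "\n" ++ pvFindingLine f) o) init =
      ([findings.filter (pvBucketP 0), findings.filter (pvBucketP 1), findings.filter (pvBucketP 2),
        findings.filter (pvBucketP 3), findings.filter (pvBucketP 4)] : List (List (List (String × String)))).flatten.foldl
        (fun o f => o ++ "\n" ++ pvFindingLine f) init :=
    fun init => (List.foldl_flatten).symm
  have hmemf : ∀ x ∈ ([findings.filter (pvBucketP 0), findings.filter (pvBucketP 1), findings.filter (pvBucketP 2),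
        findings.filter (pvBucketP 3), findings.filter (pvBucketP 4)] : List (List (List (String × String)))).flatten,
      x ∈ findings := by
    intro x hx
    rw [List.mem_flatten] at hx
    obtain ⟨l, hl, hxl⟩ := hx
    simp only [List.mem_cons, List.not_mem_nil, or_false] at hl
    rcases hl with h | h | h | h | h <;> subst h <;> exact List.mem_of_mem_filter hxl
  have hline : ∀ (init : String),
      ([findings.filter (pvBucketP 0), findings.filter (pvBucketP 1), findings.filter (pvBucketP 2),
        findings.filter (pvBucketP 3), findings.filter (pvBucketP 4)] : List (List (List (String × String)))).flatten.foldl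
        (fun x y => x ++ "\n" ++ pvLineA y) init =
      ([findings.filter (pvBucketP 0), findings.filter (pvBucketP 1), findings.filter (pvBucketP 2),
        findings.filter (pvBucketP 3), findings.filter (pvBucketP 4)] : List (List (List (String × String)))).flatten.foldl
        (fun x y => x ++ "\n" ++ pvFindingLine y) init :=
    fun init => PySem.List.foldl_congr_mem _ _ _ init
      (fun acc x hx => congrArg (fun z => acc ++ "\n" ++ z) (pv_line_eq x (hpre' x (hmemf x hx))))
  simp only [build_text_summary, build_text_summary_alt]
  rw [pv_suffix_eq, hslice, hgroups, pv_parts_eq findings hpre', hsorted]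
  by_cases hact : findings.filter (fun f => !(pvGet f "severity" == some "info")) = [] <;>
    by_cases hnotes : findings.filter (fun f => pvGet f "severity" == some "info") = [] <;>
      simp only [hact, hnotes, ne_eq, not_true_eq_false, not_false_eq_true, if_true, if_false,
        List.cons_append, List.nil_append, List.singleton_append]
  · -- no actionable, no notes
    rw [pv_join_foldl]
    simp only [List.foldl_cons, List.foldl_nil]
    rw [pv_w_status, pv_w_rules, pv_w_noact]
  · -- no actionable, some notes
    rw [pv_join_foldl]
    simp only [List.foldl_cons, List.foldl_nil, List.foldl_append, List.foldl_map]
    rw [pv_w_status, pv_w_rules, pv_w_noact, pv_w_notes]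
  · -- actionable, no notes
    rw [pv_join_foldl, hBfold]
    simp only [List.foldl_cons, List.foldl_map]
    rw [pv_w_status, pv_w_rules, pv_w_findings, hline]
  · -- actionable and notes
    rw [pv_join_foldl, hBfold]
    simp only [List.foldl_cons, List.foldl_nil, List.foldl_append, List.foldl_map]
    rw [pv_w_status, pv_w_rules, pv_w_findings, pv_w_notes, hline]
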